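-- pv_equiv track=rewrite | github.com/wyk18703232953/myResearch | codeComplex/data copy/filteredData/python/nlogn/python_nlogn_0201.py | solve
-- ===== SOURCE A (Python) =====
-- def check(k, b, T):
--     c = [e for e in b if e[0] >= k]
--
--     if len(c) < k:
--         return False, None
--
--     first_k_probs = c[:k]
--     s = sum(e[1] for e in first_k_probs)
--
--     if s > T:
--         return False, None
--
--     return True, first_k_probs
--
-- def solve(n, T, a, t):
--     b = []
--
--     for i in range(n):
--         b.append((a[i], t[i], i + 1))
--
--     b.sort(key=lambda x: x[1])
--
--     low, high = 0, n
--     result = 0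
--     final_probs = []
--
--     while low <= high:
--         mid = (low + high) // 2
--
--         possible, probs = check(mid, b, T)
--         if possible:
--             result, final_probs = mid, probs
--             low = mid + 1
--
--         else:
--             high = mid - 1
--
--     return result, [e[2] for e in final_probs]
-- ===== SOURCE B (Python) =====
-- def solve(n, T, a, t):
--     # indices 0..n-1 sorted by their time (stable, like A's tuple sort)
--     order = sorted(range(n), key=lambda i: t[i])
--
--     def feasible(k):
--         # walk the time-sorted indices once, greedily taking the first k
--         # whose difficulty allows k tasks; early exit once k are taken
--         total = 0
--         picked = []
--         for i in order:
--             if len(picked) == k: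
--                 break
--             if a[i] >= k:
--                 picked.append(i + 1)
--                 total += t[i]
--         if len(picked) == k and total <= T:
--             return picked
--         return None
--
--     def search(lo, hi, best, probs):
--         if lo > hi:
--             return best, probs
--         mid = (lo + hi) // 2
--         p = feasible(mid)
--         if p is not None:
--             return search(mid + 1, hi, mid, p)
--         return search(lo, mid - 1, best, probs)
--
--     return search(0, n, 0, [])
-- ===== Notes on version B (the rewrite author's own statement) =====
-- stated objective: alternative
-- what changed: Keeps the binary search over k (needed for exact agreement, since with negative times the feasibility predicate is not monotone and a plain max-scan would diverge from A) but rebuilds everything inside it: sorts bare indices instead of (a,t,index) tuples, decides feasibility of k in one early-exit pass that greedily collects the first k admissible 1-based indices directly, replacing A's filter + slice + sum + final map, and the while-loop becomes a recursive search carrying the answer.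
import Mathlib
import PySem

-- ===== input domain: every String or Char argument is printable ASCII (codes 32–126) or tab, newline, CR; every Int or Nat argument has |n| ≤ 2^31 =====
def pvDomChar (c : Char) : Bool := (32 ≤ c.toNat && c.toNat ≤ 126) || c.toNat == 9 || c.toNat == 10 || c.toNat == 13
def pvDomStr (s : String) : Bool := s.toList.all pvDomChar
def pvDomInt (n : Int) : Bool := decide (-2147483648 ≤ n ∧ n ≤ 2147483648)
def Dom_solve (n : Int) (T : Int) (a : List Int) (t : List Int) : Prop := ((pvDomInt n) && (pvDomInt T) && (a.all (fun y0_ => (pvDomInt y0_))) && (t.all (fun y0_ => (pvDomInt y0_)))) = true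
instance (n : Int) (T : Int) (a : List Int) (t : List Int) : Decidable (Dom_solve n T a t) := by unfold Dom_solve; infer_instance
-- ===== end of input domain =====

-- B keeps A's binary search over k but replaces its machinery: it sorts indices instead
-- of tuples and decides feasibility in ONE early-exit pass that collects the 1-based
-- indices directly, instead of A's filter + slice + sum + final map (objective: alternative).

-- ===== PORT A =====
-- check(k, b, T) from Source A
def checkA (k : Int) (b : List (Int × Int × Int)) (T : Int) : Bool × Option (List (Int × Int × Int)) :=
  let c := b.filter (fun e => decide (k ≤ e.1))
  if (c.length : Int) < k then (false, none)
  else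
    let fk := PySem.List.slice c none (some k)
    let s := (fk.map (fun e => e.2.1)).sum
    if T < s then (false, none)
    else (true, some fk)

-- the while-loop of solve, state = (low, high, result, final_probs)
def loopA (b : List (Int × Int × Int)) (T : Int) (low high result : Int)
    (finalProbs : List (Int × Int × Int)) : Int × List Int :=
  if h : low ≤ high then
    let mid := PySem.Int.floordiv (low + high) 2
    let r := checkA mid b T
    if r.1 then loopA b T (mid + 1) high mid (r.2.getD [])
    else loopA b T low (mid - 1) result finalProbs
  else (result, finalProbs.map (fun e => e.2.2))
termination_by (high - low + 1).toNat
decreasing_by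
  · have := PySem.Int.floordiv_two_mid_bounds h; omega
  · have := PySem.Int.floordiv_two_mid_bounds h; omega

def solve (n : Int) (T : Int) (a : List Int) (t : List Int) : Int × List Int :=
  let b := (PySem.List.pyRange 0 n 1).foldl
    (fun bb i => bb ++ [(PySem.List.pyGetD a i 0, PySem.List.pyGetD t i 0, i + 1)]) []
  let bs := PySem.List.sorted b (fun x => x.2.1)
  loopA bs T 0 n 0 []

-- ===== PORT B =====
-- the for-loop of feasible(k): walk time-sorted indices, take first k allowed, early exit
def feasGo (a t : List Int) (T k : Int) : List Int → Int → List Int → Option (List Int)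
  | [], total, picked =>
      if (picked.length : Int) = k ∧ total ≤ T then some picked else none
  | i :: rest, total, picked =>
      if (picked.length : Int) = k then
        (if total ≤ T then some picked else none)
      else if k ≤ PySem.List.pyGetD a i 0 then
        feasGo a t T k rest (total + PySem.List.pyGetD t i 0) (picked ++ [i + 1])
      else
        feasGo a t T k rest total picked

-- recursive binary search
def searchB (a t : List Int) (T : Int) (order : List Int) (lo hi best : Int)
    (probs : List Int) : Int × List Int :=
  if _h : hi < lo then (best, probs)
  else
    let mid := PySem.Int.floordiv (lo + hi) 2
    match feasGo a t T mid order 0 [] with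
    | some p => searchB a t T order (mid + 1) hi mid p
    | none => searchB a t T order lo (mid - 1) best probs
termination_by (hi - lo + 1).toNat
decreasing_by
  · have := PySem.Int.floordiv_two_mid_bounds (by omega : lo ≤ hi); omega
  · have := PySem.Int.floordiv_two_mid_bounds (by omega : lo ≤ hi); omega

def solve_alt (n : Int) (T : Int) (a : List Int) (t : List Int) : Int × List Int :=
  let order := PySem.List.sorted (PySem.List.pyRange 0 n 1) (fun i => PySem.List.pyGetD t i 0)
  searchB a t T order 0 n 0 []

-- ===== PRECONDITION & SPEC =====
-- Python A indexes a[i] and t[i] for i in range(n): it raises IndexError iff n exceeds a length.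
def Pre_solve (n : Int) (T : Int) (a : List Int) (t : List Int) : Prop :=
  n ≤ (a.length : Int) ∧ n ≤ (t.length : Int)
instance (n : Int) (T : Int) (a : List Int) (t : List Int) : Decidable (Pre_solve n T a t) := by
  unfold Pre_solve; infer_instance
def pvWitness_solve : Int × Int × List Int × List Int := (3, 10, [3, 2, 3], [2, 5, 1])

def Spec_solve (n : Int) (T : Int) (a : List Int) (t : List Int) (out : Int × List Int) : Prop := out = solve_alt n T a t
instance (n : Int) (T : Int) (a : List Int) (t : List Int) (out : Int × List Int) : Decidable (Spec_solve n T a t out) := by unfold Spec_solve; infer_instance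

-- ===== CLAIM (what is proved, stated in full; the proofs are below) =====
def Claim_equal_solve : Prop := ∀ (n : Int) (T : Int) (a : List Int) (t : List Int), Dom_solve n T a t → Pre_solve n T a t → Spec_solve n T a t (solve n T a t)

-- ===== LEMMAS AND PROOFS =====

theorem feasGo_spec (a t : List Int) (T k : Int) (os : List Int) :
    ∀ (total : Int) (picked : List Int), (picked.length : Int) ≤ k →
    feasGo a t T k os total picked =
      (let q := os.filter (fun i => decide (k ≤ PySem.List.pyGetD a i 0))
       let m := (k - picked.length).toNat
       if (q.length : Int) < k - (picked.length : Int) then none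
       else if total + ((q.take m).map (fun i => PySem.List.pyGetD t i 0)).sum ≤ T then
         some (picked ++ (q.take m).map (fun i => i + 1))
       else none) := by
  induction os with
  | nil =>
      intro total picked hlen
      by_cases h : (picked.length : Int) = k
      · simp [feasGo, h]
      · have h0 : (0:Int) < k - picked.length := by omega
        simp only [feasGo, List.filter_nil, List.length_nil, Nat.cast_zero]
        rw [if_neg (show ¬((picked.length : Int) = k ∧ total ≤ T) from fun hc => h hc.1),
          if_pos (show (0:Int) < k - ↑picked.length by omega)]
  | cons i rest ih =>
      intro total picked hlen
      by_cases h : (picked.length : Int) = k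
      · have h0 : k - (picked.length : Int) = 0 := by omega
        simp only [feasGo, if_pos h, h0, Int.toNat_zero, List.take_zero, List.map_nil,
          List.sum_nil, add_zero, List.append_nil]
        rw [if_neg (show ¬((((i :: rest).filter (fun j => decide (k ≤ PySem.List.pyGetD a j 0))).length : Int) < 0) by omega)]
      · have hlt : (picked.length : Int) < k := lt_of_le_of_ne hlen h
        simp only [feasGo, if_neg h]
        by_cases hi : k ≤ PySem.List.pyGetD a i 0
        · rw [if_pos hi, ih _ _ (by simp; omega)]
          have hq : (i :: rest).filter (fun j => decide (k ≤ PySem.List.pyGetD a j 0))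
              = i :: rest.filter (fun j => decide (k ≤ PySem.List.pyGetD a j 0)) := by
            simp [hi]
          rw [hq]
          have hm : (k - (picked.length : Int)).toNat
              = (k - ((picked.length:Int) + 1)).toNat + 1 := by omega
          simp only [List.length_append, List.length_cons, List.length_nil, Nat.cast_add,
            Nat.cast_one, hm, List.take_succ_cons, List.map_cons,
            List.sum_cons]
          split_ifs with h1 h2 h3 h4 h5 <;>
            first
              | rfl
              | omega
              | (simp [add_assoc] at *; omega)
              | (simp [List.append_assoc])
        · rw [if_neg hi]
          rw [ih _ _ hlen]
          simp [hi]

theorem insertBy_map {α β : Type} (g : α → β) (p : α → α → Bool) (q : β → β → Bool)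
    (hpq : ∀ x y, q (g x) (g y) = p x y) (x : α) (ys : List α) :
    PySem.List.insertBy q (g x) (ys.map g) = (PySem.List.insertBy p x ys).map g := by
  induction ys with
  | nil => rfl
  | cons y ys ih =>
      simp only [List.map, PySem.List.insertBy, hpq]
      by_cases h : p x y = true
      · simp [h]
      · simp [h, ih]

theorem sorted_map_comm {α β κ : Type} [LinearOrder κ] (g : α → β) (key : β → κ)
    (xs : List α) :
    PySem.List.sorted (xs.map g) key = (PySem.List.sorted xs (fun i => key (g i))).map g := by
  rw [PySem.List.sorted_eq_foldl_insertBy, PySem.List.sorted_eq_foldl_insertBy]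
  suffices h : ∀ acc : List α,
      (xs.map g).foldl (fun acc x => PySem.List.insertBy (fun a b => decide (key a < key b)) x acc) (acc.map g)
      = (xs.foldl (fun acc x => PySem.List.insertBy (fun a b => decide (key (g a) < key (g b))) x acc) acc).map g by
    simpa using h []
  induction xs with
  | nil => intro acc; rfl
  | cons x xs ih =>
      intro acc
      simp only [List.map, List.foldl]
      rw [insertBy_map g (fun a b => decide (key (g a) < key (g b)))
            (fun a b => decide (key a < key b)) (fun _ _ => rfl), ih]

theorem feas_eq_check (a t : List Int) (T k : Int) (hk : 0 ≤ k) (order : List Int) :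
    feasGo a t T k order 0 [] =
      (let r := checkA k (order.map (fun i => (PySem.List.pyGetD a i 0, PySem.List.pyGetD t i 0, i + 1))) T
       if r.1 then some ((r.2.getD []).map (fun e => e.2.2)) else none) := by
  rw [feasGo_spec a t T k order 0 [] (by simpa using hk)]
  unfold checkA
  simp only [List.filter_map, List.length_map, List.length_nil, Nat.cast_zero, sub_zero,
    List.nil_append]
  rw [PySem.List.slice_to _ hk]
  simp only [List.map_take, List.map_map]
  split_ifs with c1 c2 c3 c4 <;>
    simp_all [Function.comp_def] <;> omega

theorem loop_eq (a t : List Int) (T : Int) (order : List Int) :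
    ∀ (fuel : Nat) (low high result : Int) (fps : List (Int × Int × Int)),
      (high - low + 1).toNat ≤ fuel → 0 ≤ low →
    loopA (order.map (fun i => (PySem.List.pyGetD a i 0, PySem.List.pyGetD t i 0, i + 1))) T
        low high result fps
      = searchB a t T order low high result (fps.map (fun e => e.2.2)) := by
  intro fuel
  induction fuel with
  | zero =>
      intro low high result fps hf hlow
      have h : ¬ low ≤ high := by omega
      rw [loopA, searchB]
      simp [h, show high < low by omega]
  | succ m ih =>
      intro low high result fps hf hlow
      by_cases h : low ≤ high
      · rw [loopA, searchB]
        simp only [h, dif_pos, dif_neg (show ¬ high < low by omega)]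
        have hmid := PySem.Int.floordiv_two_mid_bounds h
        rw [feas_eq_check a t T _ (by omega) order]
        by_cases hr : (checkA (PySem.Int.floordiv (low + high) 2)
            (order.map (fun i => (PySem.List.pyGetD a i 0, PySem.List.pyGetD t i 0, i + 1))) T).1
        · simp only [hr, if_pos]
          rw [ih _ _ _ _ (by omega) (by omega)]
        · simp only [hr, Bool.false_eq_true, if_false]
          rw [ih _ _ _ _ (by omega) (by omega)]
      · rw [loopA, searchB]
        simp [h, show high < low by omega]

theorem solve_eq (n T : Int) (a t : List Int) : solve n T a t = solve_alt n T a t := by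
  unfold solve solve_alt
  rw [PySem.List.foldl_append_singleton_eq_map
        (fun i => (PySem.List.pyGetD a i 0, PySem.List.pyGetD t i 0, i + 1))]
  simp only [List.nil_append]
  rw [sorted_map_comm (fun i => (PySem.List.pyGetD a i 0, PySem.List.pyGetD t i 0, i + 1))
        (fun x => x.2.1)]
  rw [loop_eq a t T _ ((n - 0 + 1).toNat) 0 n 0 [] (by omega) (by omega)]
  rfl

-- ===== VERDICT (by name: the statement is the Claim_ definition above) =====
theorem solve_spec : Claim_equal_solve := by
  intro n T a t _ _
  exact solve_eq n T a t
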